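-- pv_equiv track=rewrite | github.com/ender507/Artificial-Inteligence-Homework-2020 | 1. TF-IDF编码、KNN算法和Lp距离/code/2. KNN_classification/main.py | emtCount
-- ===== SOURCE A (Python) =====
-- def emtCount(simSentence, emt):
--     emotionCount = {}
--     for eachSentence in simSentence:
--         if emt[eachSentence] not in emotionCount:
--             emotionCount[emt[eachSentence]] = 1
--         else:
--             emotionCount[emt[eachSentence]] += 1
--     return emotionCount
-- ===== SOURCE B (Python) =====
-- def emtCount(simSentence, emt):
--     labels = [emt[s] for s in simSentence]
--     return {label: labels.count(label) for label in dict.fromkeys(labels)}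
-- ===== Notes on version B (the rewrite author's own statement) =====
-- stated objective: simpler
-- what changed: Replaces A's single accumulating dict pass (membership test, insert-1-or-increment) with mapping every sentence to its label once, ordered dedup via dict.fromkeys, and a dict comprehension counting each distinct label by rescanning the label list.
import Mathlib
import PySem

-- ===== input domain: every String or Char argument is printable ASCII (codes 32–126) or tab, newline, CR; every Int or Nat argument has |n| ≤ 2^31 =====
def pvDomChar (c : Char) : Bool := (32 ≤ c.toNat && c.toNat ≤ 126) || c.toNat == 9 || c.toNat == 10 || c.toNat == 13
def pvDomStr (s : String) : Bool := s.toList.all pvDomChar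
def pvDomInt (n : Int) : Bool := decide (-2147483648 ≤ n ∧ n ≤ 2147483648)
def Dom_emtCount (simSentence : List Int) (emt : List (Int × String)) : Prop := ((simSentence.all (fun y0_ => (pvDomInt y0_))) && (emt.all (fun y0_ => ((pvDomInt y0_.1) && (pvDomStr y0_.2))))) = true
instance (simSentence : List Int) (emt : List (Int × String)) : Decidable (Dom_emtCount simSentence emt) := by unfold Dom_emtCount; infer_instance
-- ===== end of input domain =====

-- B replaces A's single accumulating dict pass with map-to-labels, ordered dedup, then count-by-rescan (objective: simpler).

-- ===== PORT A =====
-- emotionCount = {}; for eachSentence in simSentence: membership test, then insert 1 or += 1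
def emtCount (simSentence : List Int) (emt : List (Int × String)) : List (String × Int) :=
  (simSentence.foldl (fun d s =>
      match (PySem.Dict.ofList emt).get? s with
      | none => d          -- emt[eachSentence] KeyError: excluded by Pre_emtCount
      | some lbl =>
        if d.contains lbl = false then d.insert lbl 1
        else d.modify lbl 0 (· + 1))
    PySem.Dict.empty).items

-- ===== PORT B =====
-- labels = [emt[s] for s in simSentence]; {l: labels.count(l) for l in dict.fromkeys(labels)}
def emtCount_alt (simSentence : List Int) (emt : List (Int × String)) : List (String × Int) :=
  let labels := simSentence.map (fun s => ((PySem.Dict.ofList emt).get? s).getD "")   -- KeyError excluded by Pre_emtCount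
  (PySem.List.dedup labels).map (fun l => (l, (labels.count l : Int)))

-- ===== PRECONDITION & SPEC =====
-- Pre_ excludes exactly the inputs where emt[s] raises KeyError (a sentence id absent from emt).
def Pre_emtCount (simSentence : List Int) (emt : List (Int × String)) : Prop :=
  ∀ s ∈ simSentence, ((PySem.Dict.ofList emt).get? s).isSome = true
instance (simSentence : List Int) (emt : List (Int × String)) : Decidable (Pre_emtCount simSentence emt) := by unfold Pre_emtCount; infer_instance

def pvWitness_emtCount : List Int × (List (Int × String)) := ([0, 1, 0, 2], [(0, "joy"), (1, "sad"), (2, "joy")])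

def Spec_emtCount (simSentence : List Int) (emt : List (Int × String)) (out : List (String × Int)) : Prop := out = emtCount_alt simSentence emt
instance (simSentence : List Int) (emt : List (Int × String)) (out : List (String × Int)) : Decidable (Spec_emtCount simSentence emt out) := by unfold Spec_emtCount; infer_instance

-- ===== CLAIM (what is proved, stated in full; the proofs are below) =====
def Claim_equal_emtCount : Prop := ∀ (simSentence : List Int) (emt : List (Int × String)), Dom_emtCount simSentence emt → Pre_emtCount simSentence emt → Spec_emtCount simSentence emt (emtCount simSentence emt)

-- ===== LEMMAS AND PROOFS =====

-- A's loop body equals the plain counting step (insert-1 when absent IS modify with default 0).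
theorem emtCount_step_eq (d : PySem.Dict String Int) (lbl : String) :
    (if d.contains lbl = false then d.insert lbl 1 else d.modify lbl 0 (· + 1))
      = d.modify lbl 0 (· + 1) := by
  by_cases h : d.contains lbl = false
  · simp [h, PySem.Dict.insert, PySem.Dict.modify, PySem.Dict.getD_of_not_contains d 0 h]
  · simp [h]

-- Under Pre_, A's fold over sentences is the counter fold over the mapped label list.
theorem emtCount_fold_eq (emtD : PySem.Dict Int String) (ss : List Int)
    (h : ∀ s ∈ ss, (emtD.get? s).isSome = true) (d : PySem.Dict String Int) :
    ss.foldl (fun d s =>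
      match emtD.get? s with
      | none => d
      | some lbl =>
        if d.contains lbl = false then d.insert lbl 1
        else d.modify lbl 0 (· + 1)) d
    = (ss.map (fun s => (emtD.get? s).getD "")).foldl (fun d l => d.modify l 0 (· + 1)) d := by
  rw [List.foldl_map]
  apply PySem.List.foldl_congr_mem
  intro acc x hx
  obtain ⟨lbl, hlbl⟩ := Option.isSome_iff_exists.mp (h x hx)
  simp only [hlbl, Option.getD_some, emtCount_step_eq]

-- ===== VERDICT (by name: the statement is the Claim_ definition above) =====
theorem emtCount_spec : Claim_equal_emtCount := by
  intro ss emt _ hpre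
  unfold Spec_emtCount emtCount emtCount_alt
  rw [emtCount_fold_eq _ _ hpre, ← PySem.Dict.counter_eq_foldl, PySem.Dict.items_counter]
  simp only [PySem.List.dedup_eq_ofList]
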